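-- pv_equiv track=rewrite | github.com/srl3630/CS690-MiniProj1 | lyons/common/density.py | detect_lane_orientation
-- ===== SOURCE A (Python) =====
-- def detect_lane_orientation(vehicle_positions):
--     """Determine if a lane is horizontal, vertical, or diagonal based on vehicle positions."""
--     x_values = [pos[0] for pos in vehicle_positions]
--     y_values = [pos[1] for pos in vehicle_positions]
--
--     x_range = max(x_values) - min(x_values) if len(x_values) > 1 else 0
--     y_range = max(y_values) - min(y_values) if len(y_values) > 1 else 0
--
--     if x_range > y_range:
--         return "horizontal"
--     elif y_range > x_range:
--         return "vertical"
--     else: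
--         return "diagonal"
-- ===== SOURCE B (Python) =====
-- def detect_lane_orientation(vehicle_positions):
--     """Sort the positions by each coordinate and read the spread off the two
--     endpoints of each sorted order; decide by the sign of the difference."""
--     if len(vehicle_positions) <= 1:
--         return "diagonal"
--     by_x = sorted(vehicle_positions, key=lambda p: p[0])
--     by_y = sorted(vehicle_positions, key=lambda p: p[1])
--     d = (by_x[-1][0] - by_x[0][0]) - (by_y[-1][1] - by_y[0][1])
--     return "horizontal" if d > 0 else ("vertical" if d < 0 else "diagonal")
-- ===== Notes on version B (the rewrite author's own statement) =====
-- stated objective: alternative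
-- what changed: Instead of projecting the points into two coordinate lists and taking max/min of each, B sorts the position list by x and by y and reads each spread off the endpoints of the sorted orders, then decides by the sign of the single difference d = x_spread - y_spread.
import Mathlib
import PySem

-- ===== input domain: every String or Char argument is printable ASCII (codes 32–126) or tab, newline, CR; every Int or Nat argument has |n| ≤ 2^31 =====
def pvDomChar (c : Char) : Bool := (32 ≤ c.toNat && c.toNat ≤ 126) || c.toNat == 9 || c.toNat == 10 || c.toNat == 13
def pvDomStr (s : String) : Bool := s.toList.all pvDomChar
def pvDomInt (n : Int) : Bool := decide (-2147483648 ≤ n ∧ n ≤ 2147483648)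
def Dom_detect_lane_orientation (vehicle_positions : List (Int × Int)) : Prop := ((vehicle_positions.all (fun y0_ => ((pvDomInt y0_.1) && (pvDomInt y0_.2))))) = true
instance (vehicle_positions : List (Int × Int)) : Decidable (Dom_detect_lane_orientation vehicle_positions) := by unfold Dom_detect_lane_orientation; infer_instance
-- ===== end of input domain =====

-- B replaces A's projected coordinate lists and max/min calls by sorting the
-- positions by each coordinate and reading the spreads off the endpoints of the
-- two sorted orders, deciding by the sign of one difference (alternative).

-- ===== PORT A =====
def detect_lane_orientation (vehicle_positions : List (Int × Int)) : String :=
  let x_values := vehicle_positions.map (fun pos => pos.1)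
  let y_values := vehicle_positions.map (fun pos => pos.2)
  let x_range : Int :=
    if x_values.length > 1 then
      (PySem.List.max? x_values (fun v => v)).getD 0 - (PySem.List.min? x_values (fun v => v)).getD 0
    else 0
  let y_range : Int :=
    if y_values.length > 1 then
      (PySem.List.max? y_values (fun v => v)).getD 0 - (PySem.List.min? y_values (fun v => v)).getD 0
    else 0
  if x_range > y_range then "horizontal"
  else if y_range > x_range then "vertical"
  else "diagonal"

-- ===== PORT B =====
def detect_lane_orientation_alt (vehicle_positions : List (Int × Int)) : String :=
  if vehicle_positions.length ≤ 1 then "diagonal"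
  else
    let by_x := PySem.List.sorted vehicle_positions (fun p => p.1) false
    let by_y := PySem.List.sorted vehicle_positions (fun p => p.2) false
    -- by_x[-1], by_x[0] … exist since the guard ensures a nonempty list
    let d : Int :=
      (((PySem.List.pyGet? by_x (-1)).getD (0, 0)).1 - ((PySem.List.pyGet? by_x 0).getD (0, 0)).1)
      - (((PySem.List.pyGet? by_y (-1)).getD (0, 0)).2 - ((PySem.List.pyGet? by_y 0).getD (0, 0)).2)
    if d > 0 then "horizontal" else if d < 0 then "vertical" else "diagonal"

-- ===== PRECONDITION & SPEC =====
def Spec_detect_lane_orientation (vehicle_positions : List (Int × Int)) (out : String) : Prop := out = detect_lane_orientation_alt vehicle_positions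
instance (vehicle_positions : List (Int × Int)) (out : String) : Decidable (Spec_detect_lane_orientation vehicle_positions out) := by unfold Spec_detect_lane_orientation; infer_instance

-- ===== CLAIM (what is proved, stated in full; the proofs are below) =====
def Claim_equal_detect_lane_orientation : Prop := ∀ (vehicle_positions : List (Int × Int)), Dom_detect_lane_orientation vehicle_positions → Spec_detect_lane_orientation vehicle_positions (detect_lane_orientation vehicle_positions)

-- ===== LEMMAS AND PROOFS =====

/-- The key of the head of a nonempty sorted list is the (first) minimum of the keys. -/
theorem key_head_sorted (xs : List (Int × Int)) (key : Int × Int → Int) (h : xs ≠ [])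
    (m : Int) (hm : PySem.List.min? (xs.map key) (fun v => v) = some m) :
    ((PySem.List.sorted xs key false).head?.map key) = some m := by
  have hs : PySem.List.sorted xs key false ≠ [] := by
    simpa [PySem.List.sorted_eq_nil_iff] using h
  obtain ⟨a, t, hat⟩ := List.exists_cons_of_ne_nil hs
  have hmin := PySem.List.min?_isMin hm
  have hmem := PySem.List.min?_mem hm
  obtain ⟨p, hp, hpm⟩ := List.mem_map.mp hmem
  have hle : key a ≤ key p := PySem.List.key_head_sorted_le _ _ hat p hp
  have haxs : a ∈ xs := by
    have : a ∈ PySem.List.sorted xs key false := by simp [hat]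
    simpa [PySem.List.mem_sorted] using this
  have hge : m ≤ key a := hmin (key a) (List.mem_map_of_mem haxs)
  have : key a = m := le_antisymm (hpm ▸ hle) hge
  simp [hat, this]

/-- The key of the last of a nonempty sorted list is the maximum of the keys. -/
theorem key_last_sorted (xs : List (Int × Int)) (key : Int × Int → Int) (h : xs ≠ [])
    (M : Int) (hM : PySem.List.max? (xs.map key) (fun v => v) = some M) :
    ((PySem.List.sorted xs key false).getLast?.map key) = some M := by
  have hs : PySem.List.sorted xs key false ≠ [] := by
    simpa [PySem.List.sorted_eq_nil_iff] using h
  set s := PySem.List.sorted xs key false with hsdef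
  have hlen : 0 < s.length := List.length_pos_iff.mpr hs
  have hlast : s.getLast? = some s[s.length - 1] := by
    rw [List.getLast?_eq_some_getLast hs, List.getLast_eq_getElem]
  have hmax := PySem.List.max?_isMax hM
  have hmem := PySem.List.max?_mem hM
  obtain ⟨p, hp, hpM⟩ := List.mem_map.mp hmem
  -- the last element of the sorted order dominates every element
  have hdom : ∀ y ∈ s, key y ≤ key s[s.length - 1] := by
    intro y hy
    obtain ⟨i, hi, hiy⟩ := List.mem_iff_getElem.mp hy
    have := PySem.List.key_sorted_getElem_mono xs key
      (p := i) (q := s.length - 1) (by omega) (by simpa [← hsdef] using (by omega : s.length - 1 < s.length))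
    simpa [← hsdef, hiy] using this
  have hps : p ∈ s := by simpa [hsdef, PySem.List.mem_sorted] using hp
  have hge : M ≤ key s[s.length - 1] := hpM ▸ hdom p hps
  have hls : s[s.length - 1] ∈ xs :=
    (PySem.List.mem_sorted xs key false _).mp (List.getElem_mem _)
  have hle : key s[s.length - 1] ≤ M := hmax _ (List.mem_map_of_mem hls)
  have : key s[s.length - 1] = M := le_antisymm hle hge
  rw [hlast]
  simp [this]

theorem detect_lane_orientation_eq (vp : List (Int × Int)) :
    detect_lane_orientation vp = detect_lane_orientation_alt vp := by
  match vp with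
  | [] => rfl
  | [p] => simp [detect_lane_orientation, detect_lane_orientation_alt]
  | p :: q :: t =>
    have hne : (p :: q :: t : List (Int × Int)) ≠ [] := by simp
    -- the four extrema exist
    obtain ⟨Mx, hMx⟩ : ∃ M, PySem.List.max? ((p :: q :: t).map Prod.fst) (fun v => v) = some M := by
      cases hc : PySem.List.max? ((p :: q :: t).map Prod.fst) (fun v => v) with
      | none => simp [PySem.List.max?_eq_none_iff] at hc
      | some M => exact ⟨M, rfl⟩
    obtain ⟨mx, hmx⟩ : ∃ m, PySem.List.min? ((p :: q :: t).map Prod.fst) (fun v => v) = some m := by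
      cases hc : PySem.List.min? ((p :: q :: t).map Prod.fst) (fun v => v) with
      | none => simp [PySem.List.min?_eq_none_iff] at hc
      | some m => exact ⟨m, rfl⟩
    obtain ⟨My, hMy⟩ : ∃ M, PySem.List.max? ((p :: q :: t).map Prod.snd) (fun v => v) = some M := by
      cases hc : PySem.List.max? ((p :: q :: t).map Prod.snd) (fun v => v) with
      | none => simp [PySem.List.max?_eq_none_iff] at hc
      | some M => exact ⟨M, rfl⟩
    obtain ⟨my, hmy⟩ : ∃ m, PySem.List.min? ((p :: q :: t).map Prod.snd) (fun v => v) = some m := by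
      cases hc : PySem.List.min? ((p :: q :: t).map Prod.snd) (fun v => v) with
      | none => simp [PySem.List.min?_eq_none_iff] at hc
      | some m => exact ⟨m, rfl⟩
    have hhx := key_head_sorted (p :: q :: t) Prod.fst hne mx hmx
    have hlx := key_last_sorted (p :: q :: t) Prod.fst hne Mx hMx
    have hhy := key_head_sorted (p :: q :: t) Prod.snd hne my hmy
    have hly := key_last_sorted (p :: q :: t) Prod.snd hne My hMy
    -- rewrite B's endpoint reads through head?/getLast?
    have hbx : PySem.List.sorted (p :: q :: t) (fun r => r.1) false ≠ [] := by
      simpa [PySem.List.sorted_eq_nil_iff] using hne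
    have hby : PySem.List.sorted (p :: q :: t) (fun r => r.2) false ≠ [] := by
      simpa [PySem.List.sorted_eq_nil_iff] using hne
    simp only [detect_lane_orientation, detect_lane_orientation_alt,
      PySem.List.pyGet?_neg_one, PySem.List.pyGet?_zero]
    obtain ⟨ax, tx, hx⟩ := List.exists_cons_of_ne_nil hbx
    obtain ⟨ay, ty, hy⟩ := List.exists_cons_of_ne_nil hby
    obtain ⟨lx, hlx2⟩ : ∃ v, (ax :: tx).getLast? = some v :=
      ⟨_, List.getLast?_eq_some_getLast (List.cons_ne_nil ax tx)⟩
    obtain ⟨ly, hly2⟩ : ∃ v, (ay :: ty).getLast? = some v :=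
      ⟨_, List.getLast?_eq_some_getLast (List.cons_ne_nil ay ty)⟩
    rw [hx] at hhx hlx; rw [hy] at hhy hly
    rw [hlx2] at hlx; rw [hly2] at hly
    simp only [List.head?_cons, Option.map_some, Option.some.injEq] at hhx hhy hlx hly
    simp only [hx, hy, hlx2, hly2, hmx, hMx, hmy, hMy, List.length_map, List.length_cons,
      List.getElem?_cons_zero, Option.getD_some, hhx, hhy, hlx, hly]
    split_ifs <;> first | rfl | omega

-- ===== VERDICT (by name: the statement is the Claim_ definition above) =====
theorem detect_lane_orientation_spec : Claim_equal_detect_lane_orientation := by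
  intro vp _
  exact detect_lane_orientation_eq vp
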